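-- pv_equiv track=rewrite | github.com/heartsh/rna-algos | scripts/compile_rna_fams.py | recover_ss
-- ===== SOURCE A (Python) =====
-- def recover_ss(css, seq_with_gaps):
--   pos_map = {}
--   pos = 0
--   for (i, char) in enumerate(seq_with_gaps):
--     if char != "-":
--       pos_map[i] = pos
--       pos += 1
--   recovered_ss = "." * pos
--   stack = []
--   for (i, char) in enumerate(css):
--     if char == "(":
--       stack.append(i)
--     elif char == ")":
--       j = stack.pop()
--       if seq_with_gaps[j] == "-" or seq_with_gaps[i] == "-":
--         continue
--       mapped_j = pos_map[j]
--       mapped_i = pos_map[i]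
--       recovered_ss = recovered_ss[: mapped_j] + "(" + recovered_ss[mapped_j + 1 :]
--       recovered_ss = recovered_ss[: mapped_i] + ")" + recovered_ss[mapped_i + 1 :]
--   return recovered_ss
-- ===== SOURCE B (Python) =====
-- def recover_ss(css, seq_with_gaps):
--   # Bucket bracket positions by nesting depth: at any one depth the opens and
--   # closes alternate, so the t-th open at a depth pairs with the t-th close.
--   opens = {}
--   closes = {}
--   depth = 0
--   for (i, char) in enumerate(css):
--     if char == "(":
--       opens.setdefault(depth, []).append(i)
--       depth += 1
--     elif char == ")":
--       depth -= 1
--       closes.setdefault(depth, []).append(i)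
--   out = ["."] * (len(seq_with_gaps) - seq_with_gaps.count("-"))
--   for (d, open_list) in opens.items():
--     for (j, i) in zip(open_list, closes.get(d, [])):
--       if seq_with_gaps[j] != "-" and seq_with_gaps[i] != "-":
--         out[j - seq_with_gaps.count("-", 0, j)] = "("
--         out[i - seq_with_gaps.count("-", 0, i)] = ")"
--   return "".join(out)
-- ===== Notes on version B (the rewrite author's own statement) =====
-- stated objective: faster
-- what changed: A matches brackets with an explicit stack and edits the dotted result by rebuilding the whole string with two slice concatenations per matched pair, via a position dict; B has no stack and no dict: it buckets bracket positions by nesting depth, pairs the t-th open with the t-th close of each depth by zipping, computes gapless positions with str.count, and writes the brackets into a mutable list by index assignment.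
import Mathlib
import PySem

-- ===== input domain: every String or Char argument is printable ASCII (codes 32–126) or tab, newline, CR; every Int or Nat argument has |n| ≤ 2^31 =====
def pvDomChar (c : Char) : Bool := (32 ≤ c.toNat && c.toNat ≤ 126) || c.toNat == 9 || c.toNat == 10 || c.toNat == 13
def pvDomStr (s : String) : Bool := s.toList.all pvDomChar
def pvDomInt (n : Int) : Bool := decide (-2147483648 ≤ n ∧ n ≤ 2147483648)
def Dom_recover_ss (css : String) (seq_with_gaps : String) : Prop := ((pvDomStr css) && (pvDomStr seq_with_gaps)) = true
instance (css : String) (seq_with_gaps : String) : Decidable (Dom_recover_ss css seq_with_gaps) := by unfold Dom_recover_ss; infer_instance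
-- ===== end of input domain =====

-- B replaces A's stack matching and per-pair string slicing by depth-bucketing: it groups
-- bracket positions by nesting depth, pairs the t-th open with the t-th close of each depth,
-- and writes the brackets into a '.'-filled list (objective: faster by the measured constant
-- factor — no whole-string rebuild per pair).

-- ===== PORT A =====

-- first loop of A: pos_map build over enumerate(seq_with_gaps)
def pvPosMap (sl : List Char) : PySem.Dict Int Int × Int :=
  (PySem.List.enumerate sl 0).foldl
    (fun st p => if p.2 ≠ '-' then (st.1.insert p.1 st.2, st.2 + 1) else st)
    (PySem.Dict.empty, 0)

-- recovered_ss = recovered_ss[:m] + c + recovered_ss[m+1:]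
def pvSet1 (s : List Char) (m : Int) (c : Char) : List Char :=
  PySem.List.slice s none (some m) ++ [c] ++ PySem.List.slice s (some (m + 1)) none

-- body of A's second loop; the `match`/`none`/`[]` branches are where Python raises
-- (outside Pre_); pos_map[j] / pos_map[i] are ported as getD 0: the key is always
-- present when reached (the position was seen by the first loop as a non-gap)
def pvStepA (sl : List Char) (pm : PySem.Dict Int Int)
    (st : List Int × List Char) (p : Int × Char) : List Int × List Char :=
  if p.2 = '(' then (p.1 :: st.1, st.2)
  else if p.2 = ')' then
    match st.1 with
    | [] => st                               -- Python: IndexError (pop from empty list)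
    | j :: rest =>
      match PySem.List.pyGet? sl j with
      | none => st                           -- Python: IndexError on seq_with_gaps[j]
      | some cj =>
        if cj = '-' then (rest, st.2)        -- `or` short-circuits: seq_with_gaps[i] not read
        else
          match PySem.List.pyGet? sl p.1 with
          | none => st                       -- Python: IndexError on seq_with_gaps[i]
          | some ci =>
            if ci = '-' then (rest, st.2)
            else (rest, pvSet1 (pvSet1 st.2 (pm.getD j 0) '(') (pm.getD p.1 0) ')')
  else st

def recover_ss (css : String) (seq_with_gaps : String) : String :=
  let sl := seq_with_gaps.toList
  let pm := (pvPosMap sl).1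
  let pos := (pvPosMap sl).2
  -- "." * pos ; pos ≥ 0 always, and "." * pos is "" for pos < 0, exactly toNat
  let init := List.replicate pos.toNat '.'
  let fin := (PySem.List.enumerate css.toList 0).foldl (pvStepA sl pm) ([], init)
  String.mk fin.2

-- ===== PORT B =====

-- seq_with_gaps.count("-", 0, k): for a 1-char needle this counts '-' in the slice s[0:k] (exact)
def pvMappedB (sl : List Char) (k : Int) : Int :=
  k - ((PySem.List.slice sl (some 0) (some k)).count '-' : Int)

-- one step of B's bucketing loop over enumerate(css); state = (opens, closes, depth);
-- opens.setdefault(depth, []).append(i) rewrites the entry in place, i.e. Dict.insert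
def pvBktStep (st : PySem.Dict Int (List Int) × PySem.Dict Int (List Int) × Int)
    (p : Int × Char) : PySem.Dict Int (List Int) × PySem.Dict Int (List Int) × Int :=
  if p.2 = '(' then
    (st.1.insert st.2.2 (st.1.getD st.2.2 [] ++ [p.1]), st.2.1, st.2.2 + 1)
  else if p.2 = ')' then
    (st.1, st.2.1.insert (st.2.2 - 1) (st.2.1.getD (st.2.2 - 1) [] ++ [p.1]), st.2.2 - 1)
  else st

-- body of B's emission loop for one zipped pair (j, i); `none` = Python IndexError (outside Pre_)
def pvEmitB (sl : List Char) (out : List Char) (q : Int × Int) : List Char :=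
  match PySem.List.pyGet? sl q.1 with
  | none => out                              -- Python: IndexError on seq_with_gaps[j]
  | some cj =>
    if cj = '-' then out                     -- `and` short-circuits: seq_with_gaps[i] not read
    else
      match PySem.List.pyGet? sl q.2 with
      | none => out                          -- Python: IndexError on seq_with_gaps[i]
      | some ci =>
        if ci = '-' then out
        else PySem.List.pySetD (PySem.List.pySetD out (pvMappedB sl q.1) '(') (pvMappedB sl q.2) ')'

def recover_ss_alt (css : String) (seq_with_gaps : String) : String :=
  let sl := seq_with_gaps.toList
  let st := (PySem.List.enumerate css.toList 0).foldl pvBktStep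
              (PySem.Dict.empty, PySem.Dict.empty, 0)
  -- ["."] * (len(seq_with_gaps) - seq_with_gaps.count("-"))
  let out0 := List.replicate ((sl.length : Int) - (sl.count '-' : Int)).toNat '.'
  let out := st.1.items.foldl
      (fun o pr => (pr.2.zip (st.2.1.getD pr.1 [])).foldl (pvEmitB sl) o) out0
  String.mk out

-- ===== PRECONDITION & SPEC =====

-- depth of css before position k = opens minus closes among the first k characters
def pvDepth (cs : List Char) (k : Nat) : Int :=
  ((cs.take k).count '(' : Int) - ((cs.take k).count ')' : Int)

-- the matching open of a ')' at i: the greatest j ≤ i with cs[j] = '(' one level up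
def pvMatchIdx (cs : List Char) (i : Nat) : Nat :=
  Nat.findGreatest (fun j => cs[j]? = some '(' ∧ pvDepth cs j = pvDepth cs i - 1) i

-- Pre_ excludes exactly the inputs where A raises: an unbalanced prefix of css pops an
-- empty stack (IndexError), and a ')' beyond the end of seq_with_gaps whose matching
-- open is not a gap reads seq_with_gaps out of range (IndexError).
def Pre_recover_ss (css : String) (seq_with_gaps : String) : Prop :=
  (∀ k ≤ css.toList.length,
      (css.toList.take k).count ')' ≤ (css.toList.take k).count '(') ∧
  (∀ i < css.toList.length, css.toList[i]? = some ')' →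
      i < seq_with_gaps.toList.length ∨
      seq_with_gaps.toList[pvMatchIdx css.toList i]? = some '-')
instance (css : String) (seq_with_gaps : String) : Decidable (Pre_recover_ss css seq_with_gaps) := by
  unfold Pre_recover_ss; infer_instance

def pvWitness_recover_ss : String × String := ("((.))x", "AU-GCA")

def Spec_recover_ss (css : String) (seq_with_gaps : String) (out : String) : Prop := out = recover_ss_alt css seq_with_gaps
instance (css : String) (seq_with_gaps : String) (out : String) : Decidable (Spec_recover_ss css seq_with_gaps out) := by unfold Spec_recover_ss; infer_instance

-- ===== CLAIM (what is proved, stated in full; the proofs are below) =====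
def Claim_equal_recover_ss : Prop := ∀ (css : String) (seq_with_gaps : String), Dom_recover_ss css seq_with_gaps → Pre_recover_ss css seq_with_gaps → Spec_recover_ss css seq_with_gaps (recover_ss css seq_with_gaps)

-- ===== LEMMAS AND PROOFS =====

-- proof-only: A's loop with the string edits replaced by collecting the matched pairs
def pvStepP (sl : List Char)
    (st : List Int × List (Int × Int)) (p : Int × Char) : List Int × List (Int × Int) :=
  if p.2 = '(' then (p.1 :: st.1, st.2)
  else if p.2 = ')' then
    match st.1 with
    | [] => st
    | j :: rest =>
      match PySem.List.pyGet? sl j with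
      | none => st
      | some cj =>
        if cj = '-' then (rest, st.2)
        else
          match PySem.List.pyGet? sl p.1 with
          | none => st
          | some ci =>
            if ci = '-' then (rest, st.2)
            else (rest, st.2 ++ [(j, p.1)])
  else st

-- proof-only: A's two string edits for one collected pair
def pvEmit (pm : PySem.Dict Int Int) (o : List Char) (q : Int × Int) : List Char :=
  PySem.List.pySetD (PySem.List.pySetD o (pm.getD q.1 0) '(') (pm.getD q.2 0) ')'

-- proof-only: the gap test both loops apply to a matched pair
def pvChk (sl : List Char) (q : Int × Int) : Bool :=
  match PySem.List.pyGet? sl q.1 with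
  | none => false
  | some cj =>
    if cj = '-' then false
    else
      match PySem.List.pyGet? sl q.2 with
      | none => false
      | some ci => ci ≠ '-'

-- proof-only: the list of pairs B's emission phase walks over
def pvZ (O C : PySem.Dict Int (List Int)) : List (Int × Int) :=
  O.items.flatMap (fun pr => pr.2.zip (C.getD pr.1 []))

def pvEnds (O C : PySem.Dict Int (List Int)) : List Int :=
  (pvZ O C).flatMap (fun q => [q.1, q.2])

-- proof-only: the two loop states after k steps
def pvSP (sl cs : List Char) (k : Nat) : List Int × List (Int × Int) :=
  ((PySem.List.enumerate cs 0).take k).foldl (pvStepP sl) ([], [])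
def pvSB (cs : List Char) (k : Nat) :
    PySem.Dict Int (List Int) × PySem.Dict Int (List Int) × Int :=
  ((PySem.List.enumerate cs 0).take k).foldl pvBktStep (PySem.Dict.empty, PySem.Dict.empty, 0)


-- ---- A-side: pos_map characterisation and A's loop as pair collection + emission ----

lemma pvPosMap_append (xs : List Char) (x : Char) :
    pvPosMap (xs ++ [x])
      = if x ≠ '-' then ((pvPosMap xs).1.insert (xs.length : Int) (pvPosMap xs).2, (pvPosMap xs).2 + 1)
        else pvPosMap xs := by
  unfold pvPosMap
  rw [PySem.List.enumerate_append, List.foldl_append]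
  simp [PySem.List.enumerate_cons]

lemma pvPosMap_snd (sl : List Char) :
    (pvPosMap sl).2 = ((sl.countP (fun c => decide (c ≠ '-'))) : Int) := by
  induction sl using List.reverseRecOn with
  | nil => rfl
  | append_singleton xs x ih =>
    rw [pvPosMap_append]
    by_cases hx : x = '-' <;> simp [hx, List.countP_append, ih]

lemma pvPosMap_get (sl : List Char) (n : Nat) (h : n < sl.length) (hng : sl[n] ≠ '-') :
    (pvPosMap sl).1.get? (n : Int)
      = some (((sl.take n).countP (fun c => decide (c ≠ '-'))) : Int) := by
  induction sl using List.reverseRecOn with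
  | nil => simp at h
  | append_singleton xs x ih =>
    rw [pvPosMap_append]
    rcases Nat.lt_or_ge n xs.length with hn | hn
    · have hget : (xs ++ [x])[n] = xs[n] := List.getElem_append_left hn
      rw [hget] at hng
      have htake : (xs ++ [x]).take n = xs.take n :=
        List.take_append_of_le_length (Nat.le_of_lt hn)
      rw [htake]
      by_cases hx : x = '-'
      · simp only [hx, ne_eq, not_true_eq_false, if_false]
        exact ih hn hng
      · simp only [ne_eq, hx, not_false_eq_true, if_true]
        rw [PySem.Dict.get?_insert_of_ne _ _ (by exact_mod_cast Nat.ne_of_lt hn)]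
        exact ih hn hng
    · have hlen : (xs ++ [x]).length = xs.length + 1 := by simp
      have hn' : n = xs.length := by omega
      subst hn'
      have hget : (xs ++ [x])[xs.length] = x := by simp
      rw [hget] at hng
      simp only [ne_eq, hng, not_false_eq_true, if_true]
      rw [PySem.Dict.get?_insert_self]
      have htake : (xs ++ [x]).take xs.length = xs :=
        by rw [List.take_append_of_le_length (Nat.le_refl _)]; simp
      rw [htake, pvPosMap_snd]

lemma pvSet1_eq (s : List Char) (m : Nat) (c : Char) (h : m < s.length) :
    pvSet1 s (m : Int) c = s.set m c := by
  unfold pvSet1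
  have h1 : ((m : Int) + 1) = ((m + 1 : Nat) : Int) := by push_cast; ring
  rw [PySem.List.slice_to_natCast, h1, PySem.List.slice_from_natCast,
      List.set_eq_take_append_cons_drop, if_pos h]
  simp

lemma pvStepP_shift (sl : List Char) (stk : List Int) (ps : List (Int × Int)) (p : Int × Char) :
    pvStepP sl (stk, ps) p
      = ((pvStepP sl (stk, []) p).1, ps ++ (pvStepP sl (stk, []) p).2) := by
  unfold pvStepP
  by_cases h1 : p.2 = '('
  · simp [h1]
  by_cases h2 : p.2 = ')'
  case neg => simp [h1, h2]
  rw [if_neg h1, if_pos h2, if_neg h1, if_pos h2]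
  cases stk with
  | nil => simp
  | cons j rest =>
    cases hget : PySem.List.pyGet? sl j with
    | none => simp [hget]
    | some cj =>
      by_cases h3 : cj = '-'
      · simp [hget, h3]
      · cases hgi : PySem.List.pyGet? sl p.1 with
        | none => simp [hget, h3]
        | some ci => by_cases h4 : ci = '-' <;> simp [hget, h3, h4]

lemma pvFoldP_shift (sl : List Char) (l : List (Int × Char)) (stk : List Int) (ps : List (Int × Int)) :
    l.foldl (pvStepP sl) (stk, ps)
      = ((l.foldl (pvStepP sl) (stk, [])).1, ps ++ (l.foldl (pvStepP sl) (stk, [])).2) := by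
  induction l generalizing stk ps with
  | nil => simp
  | cons p t ih =>
    simp only [List.foldl_cons]
    rw [pvStepP_shift]
    rcases hb : pvStepP sl (stk, []) p with ⟨stk1, d⟩
    rw [ih stk1 (ps ++ d), ih stk1 d, List.append_assoc]

lemma pv_loop_eq (sl : List Char) (pm : PySem.Dict Int Int) (N : Nat)
    (Hpm : ∀ (j : Int) (cj : Char), 0 ≤ j → PySem.List.pyGet? sl j = some cj → cj ≠ '-' →
        ∃ m : Nat, pm.getD j 0 = (m : Int) ∧ m < N)
    (l : List (Int × Char)) (stk : List Int) (s : List Char)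
    (hl : ∀ p ∈ l, 0 ≤ p.1) (hstk : ∀ j ∈ stk, 0 ≤ j) (hs : s.length = N) :
    l.foldl (pvStepA sl pm) (stk, s)
      = ((l.foldl (pvStepP sl) (stk, [])).1,
         ((l.foldl (pvStepP sl) (stk, [])).2).foldl (pvEmit pm) s) := by
  induction l generalizing stk s with
  | nil => simp
  | cons p t ih =>
    have hp : 0 ≤ p.1 := hl p List.mem_cons_self
    have hl' : ∀ q ∈ t, 0 ≤ q.1 := fun q hq => hl q (List.mem_cons_of_mem _ hq)
    simp only [List.foldl_cons]
    by_cases h1 : p.2 = '('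
    · rw [show pvStepA sl pm (stk, s) p = (p.1 :: stk, s) by simp [pvStepA, h1],
          show pvStepP sl (stk, []) p = (p.1 :: stk, []) by simp [pvStepP, h1]]
      exact ih _ _ hl' (by intro x hx; rcases List.mem_cons.mp hx with rfl | hx2; exacts [hp, hstk _ hx2]) hs
    by_cases h2 : p.2 = ')'
    case neg =>
      rw [show pvStepA sl pm (stk, s) p = (stk, s) by simp [pvStepA, h1, h2],
          show pvStepP sl (stk, []) p = (stk, ([] : List (Int × Int))) by simp [pvStepP, h1, h2]]
      exact ih _ _ hl' hstk hs
    cases stk with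
    | nil =>
      rw [show pvStepA sl pm (([] : List Int), s) p = ([], s) by simp [pvStepA, h2],
          show pvStepP sl (([] : List Int), []) p = ([], []) by simp [pvStepP, h2]]
      exact ih _ _ hl' hstk hs
    | cons j rest =>
      have hj : 0 ≤ j := hstk j List.mem_cons_self
      have hrest : ∀ x ∈ rest, 0 ≤ x := fun x hx => hstk x (List.mem_cons_of_mem _ hx)
      cases hget : PySem.List.pyGet? sl j with
      | none =>
        rw [show pvStepA sl pm (j :: rest, s) p = (j :: rest, s) by
              simp [pvStepA, h2, hget],
            show pvStepP sl (j :: rest, []) p = (j :: rest, []) by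
              simp [pvStepP, h2, hget]]
        exact ih _ _ hl' hstk hs
      | some cj =>
        by_cases h3 : cj = '-'
        · rw [show pvStepA sl pm (j :: rest, s) p = (rest, s) by
                simp [pvStepA, h2, hget, h3],
              show pvStepP sl (j :: rest, []) p = (rest, []) by
                simp [pvStepP, h2, hget, h3]]
          exact ih _ _ hl' hrest hs
        cases hgeti : PySem.List.pyGet? sl p.1 with
        | none =>
          rw [show pvStepA sl pm (j :: rest, s) p = (j :: rest, s) by
                simp [pvStepA, h2, hget, h3, hgeti],
              show pvStepP sl (j :: rest, []) p = (j :: rest, []) by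
                simp [pvStepP, h2, hget, h3, hgeti]]
          exact ih _ _ hl' hstk hs
        | some ci =>
          by_cases h4 : ci = '-'
          · rw [show pvStepA sl pm (j :: rest, s) p = (rest, s) by
                  simp [pvStepA, h2, hget, h3, hgeti, h4],
                show pvStepP sl (j :: rest, []) p = (rest, []) by
                  simp [pvStepP, h2, hget, h3, hgeti, h4]]
            exact ih _ _ hl' hrest hs
          · obtain ⟨m1, e1, hm1⟩ := Hpm j cj hj hget h3
            obtain ⟨m2, e2, hm2⟩ := Hpm p.1 ci hp hgeti h4
            have hs' : pvSet1 (pvSet1 s (pm.getD j 0) '(') (pm.getD p.1 0) ')'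
                = pvEmit pm s (j, p.1) := by
              rw [pvEmit, e1, e2,
                  pvSet1_eq s m1 '(' (by omega),
                  pvSet1_eq _ m2 ')' (by rw [List.length_set]; omega)]
              simp
            rw [show pvStepA sl pm (j :: rest, s) p
                  = (rest, pvSet1 (pvSet1 s (pm.getD j 0) '(') (pm.getD p.1 0) ')') by
                  simp [pvStepA, h2, hget, h3, hgeti, h4],
                show pvStepP sl (j :: rest, []) p = (rest, [(j, p.1)]) by
                  simp [pvStepP, h2, hget, h3, hgeti, h4]]
            rw [hs', ih _ _ hl' hrest (by rw [← hs]; simp [pvEmit])]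
            rw [pvFoldP_shift sl t rest [(j, p.1)]]
            simp

lemma pv_Hpm (sl : List Char) :
    ∀ (j : Int) (cj : Char), 0 ≤ j →
      PySem.List.pyGet? sl j = some cj → cj ≠ '-' →
      ∃ m : Nat, (pvPosMap sl).1.getD j 0 = (m : Int) ∧
        m < ((pvPosMap sl).2).toNat := by
  intro j cj hj hget hne
  lift j to Nat using hj with n
  have hget' : sl[n]? = some cj := by simpa [pysem] using hget
  obtain ⟨hlt, he⟩ := List.getElem?_eq_some_iff.mp hget'
  have hne' : sl[n] ≠ '-' := by rw [he]; exact hne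
  refine ⟨(sl.take n).countP (fun c => decide (c ≠ '-')), ?_, ?_⟩
  · simp [PySem.Dict.getD, pvPosMap_get sl n hlt hne']
  · rw [pvPosMap_snd]
    have h1 : (sl.take (n + 1)).countP (fun c => decide (c ≠ '-'))
        = (sl.take n).countP (fun c => decide (c ≠ '-')) + 1 := by
      rw [List.take_add_one, hget', List.countP_append]
      simp [hne]
    have h2 : (sl.take (n + 1)).countP (fun c => decide (c ≠ '-'))
        ≤ sl.countP (fun c => decide (c ≠ '-')) :=
      List.Sublist.countP_le (List.take_sublist _ _)
    simp only [Int.toNat_natCast]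
    omega


-- ---- utility lemmas: depth recurrence, zip, nested folds, mapped positions ----

lemma pvDepth_zero (cs : List Char) : pvDepth cs 0 = 0 := by simp [pvDepth]

lemma pvDepth_succ (cs : List Char) (k : Nat) (hk : k < cs.length) :
    pvDepth cs (k + 1)
      = pvDepth cs k + (if cs[k] = '(' then 1 else if cs[k] = ')' then -1 else 0) := by
  unfold pvDepth
  rw [List.take_add_one, List.getElem?_eq_getElem hk]
  simp only [Option.toList_some, List.count_append]
  by_cases h1 : cs[k] = '(' <;> by_cases h2 : cs[k] = ')' <;>
    simp [h1, h2, List.count_singleton] <;> push_cast <;> omega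

lemma pvZipTrunc {α β : Type} (a : List α) (b : List β) (x : α) (h : b.length ≤ a.length) :
    (a ++ [x]).zip b = a.zip b := by
  induction a generalizing b with
  | nil =>
    cases b with
    | nil => simp
    | cons z b => simp at h
  | cons y a ih =>
    cases b with
    | nil => simp
    | cons z b => simpa using ih b (by simpa using h)

lemma pvZipSnoc {α β : Type} (a : List α) (b : List β) (y : β) (v : α)
    (h : a.length = b.length + 1) (hv : a.getLast? = some v) :
    a.zip (b ++ [y]) = a.zip b ++ [(v, y)] := by
  have hne : a ≠ [] := by intro hh; subst hh; simp at h
  have hsplit : a.dropLast ++ [a.getLast hne] = a := List.dropLast_append_getLast hne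
  have hvv : a.getLast hne = v := by
    have h5 := List.getLast?_eq_getLast (l := a) hne
    rw [h5] at hv; exact Option.some.inj hv
  have hlen : a.dropLast.length = b.length := by
    have h6 : a.dropLast.length = a.length - 1 := List.length_dropLast
    omega
  conv_lhs => rw [← hsplit]
  rw [List.zip_append hlen, ← hvv]
  congr 1
  conv_rhs => rw [← hsplit]
  rw [pvZipTrunc _ _ _ (by omega)]

lemma pvFoldNested {α β γ : Type} (l : List β) (g : β → List α) (f : γ → α → γ) (z : γ) :
    l.foldl (fun o pr => (g pr).foldl f o) z = (l.flatMap g).foldl f z := by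
  induction l generalizing z with
  | nil => rfl
  | cons b t ih => simp [List.foldl_append, ih]

lemma pvFoldFilter {α γ : Type} (p : α → Bool) (f : γ → α → γ)
    (hid : ∀ z a, p a = false → f z a = z) (l : List α) (z : γ) :
    l.foldl f z = (l.filter p).foldl f z := by
  induction l generalizing z with
  | nil => rfl
  | cons a t ih =>
    by_cases h : p a = true
    · simp [List.filter_cons, h, ih]
    · have h' : p a = false := by simpa using h
      simp [List.filter_cons, h', hid z a h', ih]

lemma pvEmitB_id (sl : List Char) (out : List Char) (q : Int × Int)
    (h : pvChk sl q = false) : pvEmitB sl out q = out := by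
  unfold pvEmitB
  unfold pvChk at h
  cases hj : PySem.List.pyGet? sl q.1 with
  | none => rfl
  | some cj =>
    rw [hj] at h
    simp only at h ⊢
    by_cases h3 : cj = '-'
    · simp [h3]
    · rw [if_neg h3] at h ⊢
      cases hi : PySem.List.pyGet? sl q.2 with
      | none => rfl
      | some ci =>
        rw [hi] at h
        simp only at h
        have : ci = '-' := by simpa using h
        simp [this]

lemma pvCountPartition (sl : List Char) (j : Nat) (hj : j ≤ sl.length) :
    ((sl.take j).countP (fun c => decide (c ≠ '-')) : Int)
      = (j : Int) - ((sl.take j).count '-' : Int) := by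
  have hlen : (sl.take j).length = j := by simp [hj]
  have hpart := List.length_eq_countP_add_countP (p := fun c : Char => decide (c = '-'))
    (l := sl.take j)
  have hc : (sl.take j).count '-' = (sl.take j).countP (fun c => decide (c = '-')) := by
    rw [List.count_eq_countP]
    apply List.countP_congr
    intro c _; rw [Bool.eq_iff_iff]; simp
  have hne : (sl.take j).countP (fun c => decide (c ≠ '-'))
      = (sl.take j).countP (fun a => decide (¬(decide (a = '-') = true))) := by
    apply List.countP_congr; intro c _; simp
  omega

lemma pvMappedB_eq (sl : List Char) (j : Nat) (hj : j ≤ sl.length) :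
    pvMappedB sl (j : Int) = ((sl.take j).countP (fun c => decide (c ≠ '-')) : Int) := by
  unfold pvMappedB
  rw [PySem.List.slice_toNat sl (le_refl (0 : Int)) (Int.natCast_nonneg j)]
  rw [show ((0:Int).toNat) = 0 from rfl, List.drop_zero, Int.toNat_natCast, Nat.sub_zero]
  rw [pvCountPartition sl j hj]

lemma pvPosMap_getD_eq (sl : List Char) (j : Nat) (h : j < sl.length) (hng : sl[j] ≠ '-') :
    (pvPosMap sl).1.getD (j : Int) 0 = pvMappedB sl (j : Int) := by
  rw [PySem.Dict.getD, pvPosMap_get sl j h hng, pvMappedB_eq sl j (le_of_lt h)]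
  rfl

lemma pvMapped_mono (sl : List Char) (a b : Nat) (hab : a < b) (hb : b ≤ sl.length)
    (hng : ∀ ca, sl[a]? = some ca → ca ≠ '-') :
    (sl.take a).countP (fun c => decide (c ≠ '-')) < (sl.take b).countP (fun c => decide (c ≠ '-')) := by
  have ha : a < sl.length := lt_of_lt_of_le hab hb
  have h1 : (sl.take (a + 1)).countP (fun c => decide (c ≠ '-'))
      = (sl.take a).countP (fun c => decide (c ≠ '-')) + 1 := by
    rw [List.take_add_one, List.getElem?_eq_getElem ha, List.countP_append]
    have := hng sl[a] (List.getElem?_eq_getElem ha)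
    simp [this]
  have h2 : (sl.take (a + 1)).countP (fun c => decide (c ≠ '-'))
      ≤ (sl.take b).countP (fun c => decide (c ≠ '-')) :=
    List.Sublist.countP_le ((List.take_prefix_take_left (by omega)).sublist)
  omega

-- the joint invariant of the two loops
structure PvInv (sl cs : List Char) (k : Nat) : Prop where
  hdep : (pvSB cs k).2.2 = pvDepth cs k
  hlen : (((pvSP sl cs k).1).length : Int) = pvDepth cs k
  hstk : ∀ t (ht : t < ((pvSP sl cs k).1).length), ∃ x : Nat,
      ((pvSP sl cs k).1)[t] = (x : Int) ∧ x < k ∧ cs[x]? = some '(' ∧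
      pvDepth cs x = ((((pvSP sl cs k).1).length - 1 - t : Nat) : Int) ∧
      ∀ m : Nat, x < m → m ≤ k → pvDepth cs x < pvDepth cs m
  hbkt : ∀ ℓ : Nat, ((pvSB cs k).1.getD (ℓ : Int) []).length
      = ((pvSB cs k).2.1.getD (ℓ : Int) []).length
        + (if ℓ < ((pvSP sl cs k).1).length then 1 else 0)
  hlast : ∀ t (ht : t < ((pvSP sl cs k).1).length),
      ((pvSB cs k).1.getD (((((pvSP sl cs k).1).length - 1 - t : Nat) : Int)) []).getLast?
        = some (((pvSP sl cs k).1)[t])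
  hperm : ((pvSP sl cs k).2).Perm ((pvZ (pvSB cs k).1 (pvSB cs k).2.1).filter (pvChk sl))
  hnd : ((pvSP sl cs k).1 ++ pvEnds (pvSB cs k).1 (pvSB cs k).2.1).Nodup
  hbound : ∀ x ∈ (pvSP sl cs k).1 ++ pvEnds (pvSB cs k).1 (pvSB cs k).2.1,
      0 ≤ x ∧ x < (k : Int)
  hkeys : (pvSB cs k).1.keys.Nodup

-- ---- dictionary-level lemmas about the pair list pvZ ----

lemma pvGetD_eq_of_get? {ν : Type} (d : PySem.Dict Int ν) (k : Int) (v d0 : ν)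
    (h : d.get? k = some v) : d.getD k d0 = v := by
  unfold PySem.Dict.getD
  rw [h]; rfl

lemma pvGetD_of_not_contains {ν : Type} (d : PySem.Dict Int ν) (k : Int) (d0 : ν)
    (h : d.contains k = false) : d.getD k d0 = d0 := by
  unfold PySem.Dict.getD
  rw [(PySem.Dict.get?_eq_none_iff_contains d k).mpr h]; rfl

lemma pvZ_insert_open (O C : PySem.Dict Int (List Int)) (hk : O.keys.Nodup) (ℓ : Int) (v : Int)
    (hlen : (O.getD ℓ []).length = (C.getD ℓ []).length) :
    pvZ (O.insert ℓ (O.getD ℓ [] ++ [v])) C = pvZ O C := by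
  unfold pvZ
  by_cases hc : O.contains ℓ = true
  · rw [PySem.Dict.items_insert_of_contains O _ hc, List.flatMap_map]
    apply List.flatMap_congr
    intro pr hpr
    by_cases he : pr.1 = ℓ
    · have hget : O.get? pr.1 = some pr.2 := PySem.Dict.get?_of_mem_items O (by simpa using hpr) hk
      have hgd : O.getD ℓ [] = pr.2 := by
        rw [← he]; exact pvGetD_eq_of_get? _ _ _ _ hget
      simp only [he, beq_self_eq_true, if_true]
      rw [hgd]
      exact pvZipTrunc pr.2 (C.getD ℓ []) v (by rw [← hgd, hlen]) |>.trans rfl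
    · simp [he]
  · have hc' : O.contains ℓ = false := by simpa using hc
    rw [PySem.Dict.items_insert_of_not_contains O _ hc', List.flatMap_append]
    have h0 : O.getD ℓ [] = [] := pvGetD_of_not_contains O ℓ [] hc'
    have h1 : (C.getD ℓ []).length = 0 := by rw [← hlen, h0]; rfl
    have h2 : C.getD ℓ [] = [] := List.eq_nil_of_length_eq_zero h1
    simp [pvGetD_of_not_contains O ℓ [] hc', h2]

lemma pvZ_insert_close (O C : PySem.Dict Int (List Int)) (hk : O.keys.Nodup)
    (ℓ : Int) (w v : Int)
    (hlen : (O.getD ℓ []).length = (C.getD ℓ []).length + 1)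
    (hv : (O.getD ℓ []).getLast? = some v) :
    ∃ Z1 Z2, pvZ O C = Z1 ++ Z2 ∧
      pvZ O (C.insert ℓ (C.getD ℓ [] ++ [w])) = Z1 ++ [(v, w)] ++ Z2 := by
  have hne : O.getD ℓ [] ≠ [] := by
    intro h0; rw [h0] at hlen; simp at hlen
  have hcont : O.contains ℓ = true := by
    by_contra hc
    have hc' : O.contains ℓ = false := by simpa using hc
    exact hne (pvGetD_of_not_contains O ℓ [] hc')
  have hget : O.get? ℓ = some (O.getD ℓ []) := by
    unfold PySem.Dict.getD
    cases h : O.get? ℓ with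
    | none => rw [(PySem.Dict.get?_eq_none_iff_contains O ℓ).mp h] at hcont; simp at hcont
    | some x => rfl
  have hmem : (ℓ, O.getD ℓ []) ∈ O.items :=
    (PySem.Dict.get?_eq_some_iff_mem_items O ℓ _ hk).mp hget
  obtain ⟨s, t, hsplit⟩ := List.append_of_mem hmem
  have hkeys : ∀ pr ∈ s ++ t, pr.1 ≠ ℓ := by
    intro pr hpr
    have h1 : (s ++ (ℓ, O.getD ℓ []) :: t).map Prod.fst |>.Nodup := by
      rw [← hsplit]; exact hk
    simp only [List.map_append, List.map_cons] at h1
    have h2 := (List.nodup_middle (a := ℓ) (l₁ := s.map Prod.fst) (l₂ := t.map Prod.fst)).mp (by simpa using h1)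
    intro he
    rcases List.mem_append.mp hpr with hs | ht
    · exact (List.nodup_cons.mp h2).1 (by rw [← he]; exact List.mem_append.mpr (Or.inl (List.mem_map_of_mem hs)))
    · exact (List.nodup_cons.mp h2).1 (by rw [← he]; exact List.mem_append.mpr (Or.inr (List.mem_map_of_mem ht)))
  refine ⟨s.flatMap (fun pr => pr.2.zip (C.getD pr.1 [])) ++ (O.getD ℓ []).zip (C.getD ℓ []),
          t.flatMap (fun pr => pr.2.zip (C.getD pr.1 [])), ?_, ?_⟩
  · unfold pvZ
    rw [hsplit, List.flatMap_append, List.flatMap_cons, List.append_assoc]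
  · unfold pvZ
    rw [hsplit, List.flatMap_append, List.flatMap_cons]
    have hs' : s.flatMap (fun pr => pr.2.zip ((C.insert ℓ (C.getD ℓ [] ++ [w])).getD pr.1 []))
        = s.flatMap (fun pr => pr.2.zip (C.getD pr.1 [])) := by
      apply List.flatMap_congr; intro pr hpr
      rw [PySem.Dict.getD_insert, if_neg (hkeys pr (List.mem_append.mpr (Or.inl hpr)))]
    have ht' : t.flatMap (fun pr => pr.2.zip ((C.insert ℓ (C.getD ℓ [] ++ [w])).getD pr.1 []))
        = t.flatMap (fun pr => pr.2.zip (C.getD pr.1 [])) := by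
      apply List.flatMap_congr; intro pr hpr
      rw [PySem.Dict.getD_insert, if_neg (hkeys pr (List.mem_append.mpr (Or.inr hpr)))]
    rw [hs', ht']
    rw [PySem.Dict.getD_insert, if_pos rfl]
    rw [pvZipSnoc _ _ w v hlen hv]
    simp

-- ---- one step of each loop ----

lemma pvE_take (cs : List Char) (k : Nat) (hk : k < cs.length) :
    (PySem.List.enumerate cs 0).take (k + 1)
      = (PySem.List.enumerate cs 0).take k ++ [((k : Int), cs[k])] := by
  rw [List.take_add_one]
  rw [PySem.List.getElem?_enumerate, List.getElem?_eq_getElem hk]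
  simp

lemma pvSP_succ (sl cs : List Char) (k : Nat) (hk : k < cs.length) :
    pvSP sl cs (k + 1) = pvStepP sl (pvSP sl cs k) ((k : Int), cs[k]) := by
  unfold pvSP
  rw [pvE_take cs k hk, List.foldl_append]
  rfl

lemma pvSB_succ (cs : List Char) (k : Nat) (hk : k < cs.length) :
    pvSB cs (k + 1) = pvBktStep (pvSB cs k) ((k : Int), cs[k]) := by
  unfold pvSB
  rw [pvE_take cs k hk, List.foldl_append]
  rfl

lemma pvDepth_nonneg (cs : List Char) (k : Nat)
    (hbal : ∀ m ≤ cs.length, (cs.take m).count ')' ≤ (cs.take m).count '(')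
    (hk : k ≤ cs.length) : 0 ≤ pvDepth cs k := by
  have := hbal k hk
  unfold pvDepth
  omega

-- the popped open is the depth-matching open of the closing bracket
lemma pv_match_head (cs : List Char) (k : Nat) (hcl : cs[k]? = some ')')
    (n1 : Nat) (x0 : Nat) (hxk : x0 < k) (hopen : cs[x0]? = some '(')
    (hdx : pvDepth cs x0 = (n1 : Int)) (hdk : pvDepth cs k = (n1 : Int) + 1)
    (hdom : ∀ m : Nat, x0 < m → m ≤ k → pvDepth cs x0 < pvDepth cs m) :
    pvMatchIdx cs k = x0 := by
  unfold pvMatchIdx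
  rw [Nat.findGreatest_eq_iff]
  refine ⟨le_of_lt hxk, fun _ => ⟨hopen, by omega⟩, ?_⟩
  intro j hj hjk hPj
  obtain ⟨hj1, hj2⟩ := hPj
  by_cases hjek : j = k
  · rw [hjek, hcl] at hj1; simp at hj1
  · have := hdom j hj (by omega)
    omega

lemma pvFlatNil {α β : Type} (l : List α) :
    l.flatMap (fun _ => ([] : List β)) = [] := by
  induction l <;> simp_all

lemma pv_master (sl cs : List Char)
    (hbal : ∀ k ≤ cs.length, (cs.take k).count ')' ≤ (cs.take k).count '(')
    (hpre : ∀ i < cs.length, cs[i]? = some ')' →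
      i < sl.length ∨ sl[pvMatchIdx cs i]? = some '-') :
    ∀ k ≤ cs.length, PvInv sl cs k := by
  intro k
  induction k with
  | zero =>
    intro _
    refine PvInv.mk ?_ ?_ ?_ ?_ ?_ ?_ ?_ ?_ ?_ <;>
      simp [pvSP, pvSB, pvZ, pvEnds, pvDepth_zero, PySem.Dict.getD_empty, pvFlatNil]
  | succ k ih =>
    intro hk1
    have hk : k < cs.length := by omega
    obtain ⟨hdep, hlen, hstk, hbkt, hlast, hperm, hnd, hbound, hkeys⟩ := ih (by omega)
    rcases hSP : pvSP sl cs k with ⟨S, P⟩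
    rcases hSB : pvSB cs k with ⟨O, C, dep⟩
    simp only [hSP, hSB] at hdep hlen hstk hbkt hlast hperm hnd hbound hkeys
    have hstep : pvSP sl cs (k+1) = pvStepP sl (S, P) ((k : Int), cs[k]) := by
      rw [pvSP_succ sl cs k hk, hSP]
    have hstepB : pvSB cs (k+1) = pvBktStep (O, C, dep) ((k : Int), cs[k]) := by
      rw [pvSB_succ cs k hk, hSB]
    have hdsucc := pvDepth_succ cs k hk
    have hnn1 := pvDepth_nonneg cs (k+1) hbal (by omega)
    by_cases h1 : cs[k] = '('
    -- ============ case '(' ============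
    · have hdk1 : pvDepth cs (k+1) = pvDepth cs k + 1 := by rw [hdsucc]; simp [h1]
      have hdepS : dep = (S.length : Int) := hdep.trans hlen.symm
      have hnewP : pvSP sl cs (k+1) = ((k : Int) :: S, P) := by
        rw [hstep]; simp [pvStepP, h1]
      have hnewB : pvSB cs (k+1)
          = (O.insert dep (O.getD dep [] ++ [(k : Int)]), C, dep + 1) := by
        rw [hstepB]; simp [pvBktStep, h1]
      have hOCd : (O.getD dep []).length = (C.getD dep []).length := by
        have := hbkt S.length
        rw [← hdepS] at this
        simpa using this
      refine PvInv.mk ?_ ?_ ?_ ?_ ?_ ?_ ?_ ?_ ?_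
      · rw [hnewB]; simp only; omega
      · rw [hnewP]; simp only [List.length_cons]; push_cast; omega
      · rw [hnewP]; simp only
        intro t ht
        cases t with
        | zero =>
          refine ⟨k, rfl, by omega, by rw [List.getElem?_eq_getElem hk, h1], ?_, ?_⟩
          · simp only [List.length_cons]
            have : S.length + 1 - 1 - 0 = S.length := by omega
            rw [this]; omega
          · intro m hm1 hm2
            have hmk : m = k + 1 := by omega
            subst hmk; omega
        | succ t =>
          have ht' : t < S.length := by simpa using ht
          obtain ⟨x, hx, hxk, hop, hdx, hdom⟩ := hstk t ht'
          refine ⟨x, by simpa using hx, by omega, hop, ?_, ?_⟩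
          · rw [hdx]; congr 1; simp only [List.length_cons]; omega
          · intro m hm1 hm2
            rcases Nat.lt_or_ge m (k+1) with hm | hm
            · exact hdom m hm1 (by omega)
            · have hmk : m = k + 1 := by omega
              subst hmk
              have := hdom k hxk le_rfl
              omega
      · rw [hnewP, hnewB]; simp only
        intro ℓ
        rw [PySem.Dict.getD_insert]
        by_cases he : (ℓ : Int) = dep
        · rw [if_pos he]
          have hℓ : ℓ = S.length := by rw [hdepS] at he; exact_mod_cast he
          subst hℓ
          have hCd : C.getD dep [] = C.getD ((S.length : Int)) [] := by rw [← he]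
          simp only [List.length_append, List.length_cons, List.length_nil]
          rw [if_pos (by omega)]
          rw [← hCd, hOCd]
        · rw [if_neg he]
          have hold := hbkt ℓ
          simp only [List.length_cons]
          by_cases hlt : ℓ < S.length
          · rw [if_pos hlt] at hold
            rw [if_pos (by omega)]
            exact hold
          · rw [if_neg hlt] at hold
            rw [if_neg (by omega)]
            exact hold
      · rw [hnewP, hnewB]; simp only
        intro t ht
        cases t with
        | zero =>
          simp only [List.length_cons, List.getElem_cons_zero]
          have hlv : ((S.length + 1 - 1 - 0 : Nat) : Int) = dep := by
            rw [hdepS]; push_cast; omega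
          rw [hlv, PySem.Dict.getD_insert, if_pos rfl]
          simp
        | succ t =>
          have ht' : t < S.length := by simpa using ht
          have hlv : (S.length + 1 - 1 - (t+1) : Nat) = (S.length - 1 - t : Nat) := by omega
          simp only [List.length_cons, List.getElem_cons_succ, hlv]
          rw [PySem.Dict.getD_insert, if_neg ?hne]
          case hne =>
            rw [hdepS]
            intro hh
            have : S.length - 1 - t = S.length := by exact_mod_cast hh
            omega
          exact hlast t ht'
      · rw [hnewP, hnewB]; simp only
        rw [pvZ_insert_open O C hkeys dep ((k : Int)) hOCd]
        exact hperm
      · rw [hnewP, hnewB]; simp only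
        unfold pvEnds at hnd hbound ⊢
        rw [pvZ_insert_open O C hkeys dep ((k : Int)) hOCd]
        rw [List.cons_append, List.nodup_cons]
        refine ⟨?_, hnd⟩
        intro hmem
        have := (hbound _ hmem).2
        omega
      · rw [hnewP, hnewB]; simp only
        unfold pvEnds at hbound ⊢
        rw [pvZ_insert_open O C hkeys dep ((k : Int)) hOCd]
        intro x hx
        rw [List.cons_append, List.mem_cons] at hx
        rcases hx with rfl | hx
        · exact ⟨Int.natCast_nonneg k, by push_cast; omega⟩
        · have h7 := hbound x hx
          exact ⟨h7.1, by have := h7.2; omega⟩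
      · rw [hnewB]; simp only
        by_cases hc : O.contains dep = true
        · rw [PySem.Dict.keys_insert_of_contains O _ hc]; exact hkeys
        · have hc' : O.contains dep = false := by simpa using hc
          rw [PySem.Dict.keys_insert_of_not_contains O _ hc']
          rw [List.nodup_append]
          refine ⟨hkeys, List.nodup_singleton _, ?_⟩
          intro a ha b hb
          simp only [List.mem_singleton] at hb
          intro heq
          rw [heq, hb] at ha
          have := (PySem.Dict.contains_iff_mem_keys O dep).mpr ha
          rw [hc'] at this
          exact Bool.false_ne_true this
    · by_cases h2 : cs[k] = ')'
      -- ============ case ')' ============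
      · have hdk1 : pvDepth cs (k+1) = pvDepth cs k - 1 := by
          rw [hdsucc, if_neg h1, if_pos h2]; ring
        have hSpos : 0 < S.length := by
          by_contra hh
          have : S.length = 0 := by omega
          rw [this] at hlen
          omega
        cases S with
        | nil => simp at hSpos
        | cons s0 rest =>
        obtain ⟨x0, hx0, hx0k, hop, hdx0, hdom0⟩ := hstk 0 hSpos
        have hs0 : s0 = (x0 : Int) := by simpa using hx0
        subst hs0
        have hlen' : ((rest.length + 1 : Nat) : Int) = pvDepth cs k := by
          simpa using hlen
        have hdx0' : pvDepth cs x0 = (rest.length : Int) := by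
          rw [hdx0]; simp
        have hcl : cs[k]? = some ')' := by rw [List.getElem?_eq_getElem hk, h2]
        have hM : pvMatchIdx cs k = x0 := by
          apply pv_match_head cs k hcl rest.length x0 hx0k hop hdx0'
          · rw [← hlen']; push_cast; omega
          · exact hdom0
        have hgx : PySem.List.pyGet? sl ((x0 : Int)) = sl[x0]? :=
          PySem.List.pyGet?_natCast sl x0
        -- the B-state step is the same in all subcases
        have hnewB : pvSB cs (k+1)
            = (O, C.insert (dep - 1) (C.getD (dep - 1) [] ++ [(k : Int)]), dep - 1) := by
          rw [hstepB]; simp [pvBktStep, h1, h2]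
        have hdep1 : dep - 1 = (rest.length : Int) := by
          rw [hdep, ← hlen']; push_cast; omega
        have hOC1 : (O.getD ((rest.length : Int)) []).length
            = (C.getD ((rest.length : Int)) []).length + 1 := by
          have h8 := hbkt rest.length
          have hlt : rest.length < ((x0 : Int) :: rest).length := by simp
          rw [if_pos hlt] at h8
          exact h8
        have hvlast : (O.getD ((rest.length : Int)) []).getLast? = some ((x0 : Int)) := by
          have h8 := hlast 0 hSpos
          have hlv : ((((x0 : Int) :: rest).length - 1 - 0 : Nat)) = rest.length := by simp
          rw [hlv] at h8
          simpa using h8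
        obtain ⟨Z1, Z2, hZ, hZ'⟩ :=
          pvZ_insert_close O C hkeys ((rest.length : Int)) ((k : Int)) ((x0 : Int)) hOC1 hvlast
        -- decide the A branch and the pair-check value together
        have hbranch :
            ∃ added : Bool,
              pvSP sl cs (k+1) = (rest, if added then P ++ [((x0 : Int), (k : Int))] else P)
              ∧ pvChk sl ((x0 : Int), (k : Int)) = added := by
          cases hg : sl[x0]? with
          | none =>
            exfalso
            have hx0L : sl.length ≤ x0 := by
              by_contra hh
              rw [List.getElem?_eq_getElem (by omega)] at hg
              simp at hg
            rcases hpre k hk hcl with hkL | hMg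
            · omega
            · rw [hM, hg] at hMg; simp at hMg
          | some cj =>
            by_cases hcj : cj = '-'
            · refine ⟨false, ?_, ?_⟩
              · rw [hstep]
                simp [pvStepP, h1, h2, hgx, hg, hcj]
              · simp [pvChk, hgx, hg, hcj]
            · have hkL : k < sl.length := by
                rcases hpre k hk hcl with hkL | hMg
                · exact hkL
                · exfalso
                  rw [hM, hg] at hMg
                  exact hcj (by simpa using hMg)
              have hgk : PySem.List.pyGet? sl ((k : Int)) = some sl[k] := by
                rw [PySem.List.pyGet?_natCast, List.getElem?_eq_getElem hkL]
              by_cases hci : sl[k] = '-'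
              · refine ⟨false, ?_, ?_⟩
                · rw [hstep]
                  simp [pvStepP, h1, h2, hgx, hg, hcj, hgk, hci]
                · simp [pvChk, hgx, hg, hcj, hgk, hci]
              · refine ⟨true, ?_, ?_⟩
                · rw [hstep]
                  simp [pvStepP, h1, h2, hgx, hg, hcj, hgk, hci]
                · simp [pvChk, hgx, hg, hcj, hgk, hci]
        obtain ⟨added, hnewP, hchk⟩ := hbranch
        -- the new end list is the old one plus the closing position
        have hperm_all : ((pvSP sl cs (k+1)).1 ++ pvEnds (pvSB cs (k+1)).1 (pvSB cs (k+1)).2.1).Perm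
            (((((x0 : Int) :: rest)) ++ pvEnds O C) ++ [(k : Int)]) := by
          rw [hnewP, hnewB]
          simp only
          unfold pvEnds
          rw [hdep1, hZ']
          rw [List.perm_iff_count]
          intro a
          rw [hZ]
          simp [List.count_append, List.count_cons]
          omega
        have hknotin : ((k : Int)) ∉ ((x0 : Int) :: rest) ++ pvEnds O C := by
          intro hmem
          have := (hbound _ hmem).2
          omega
        refine PvInv.mk ?_ ?_ ?_ ?_ ?_ ?_ ?_ ?_ ?_
        · rw [hnewB]; simp only; omega
        · rw [hnewP]; simp only; omega
        · rw [hnewP]; simp only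
          intro t ht
          have ht' : t + 1 < ((x0 : Int) :: rest).length := by simp; omega
          obtain ⟨x, hx, hxk, hopx, hdx, hdomx⟩ := hstk (t+1) ht'
          simp only [List.getElem_cons_succ] at hx
          refine ⟨x, hx, by omega, hopx, ?_, ?_⟩
          · rw [hdx]; congr 1; simp; omega
          · intro m hm1 hm2
            rcases Nat.lt_or_ge m (k+1) with hm | hm
            · exact hdomx m hm1 (by omega)
            · have hmk : m = k + 1 := by omega
              subst hmk
              rw [hdk1, ← hlen']
              rw [hdx]
              simp only [List.length_cons]
              push_cast
              omega
        · rw [hnewP, hnewB]; simp only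
          intro ℓ
          rw [hdep1, PySem.Dict.getD_insert]
          by_cases he : (ℓ : Int) = (rest.length : Int)
          · have hℓ : ℓ = rest.length := by exact_mod_cast he
            subst hℓ
            rw [if_pos rfl]
            simp only [List.length_append, List.length_cons, List.length_nil]
            rw [hOC1]
            rw [if_neg (by omega : ¬ (rest.length < rest.length))]
          · rw [if_neg he]
            have hℓ2 : ℓ ≠ rest.length := fun hh => he (by rw [hh])
            have hold := hbkt ℓ
            by_cases hlt : ℓ < ((x0 : Int) :: rest).length
            · rw [if_pos hlt] at hold
              simp only [List.length_cons] at hlt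
              rw [if_pos (by omega)]
              exact hold
            · rw [if_neg hlt] at hold
              simp only [List.length_cons] at hlt
              rw [if_neg (by omega)]
              exact hold
        · rw [hnewP, hnewB]; simp only
          intro t ht
          have ht' : t + 1 < ((x0 : Int) :: rest).length := by simp; omega
          have h8 := hlast (t+1) ht'
          simp only [List.getElem_cons_succ] at h8
          have hlv : ((((x0 : Int) :: rest).length - 1 - (t+1) : Nat)) = (rest.length - 1 - t : Nat) := by
            simp; omega
          rw [hlv] at h8
          exact h8
        · rw [hnewP, hnewB]; simp only
          rw [hdep1, hZ']
          have hfilter : (Z1 ++ [((x0 : Int), (k : Int))] ++ Z2).filter (pvChk sl)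
              = Z1.filter (pvChk sl)
                ++ (if added then [((x0 : Int), (k : Int))] else [])
                ++ Z2.filter (pvChk sl) := by
            rw [List.filter_append, List.filter_append]
            congr 1
            congr 1
            rw [List.filter_singleton, hchk]
            cases added <;> simp
          rw [hfilter]
          rw [List.perm_iff_count]
          intro a
          have h3 := hperm.count_eq a
          rw [hZ, List.filter_append] at h3
          cases added <;>
            simp only [Bool.false_eq_true, if_false, if_true, List.count_append,
              List.count_cons, List.count_nil, List.append_nil] at h3 ⊢ <;> omega
        · refine hperm_all.nodup_iff.mpr ?_
          rw [List.nodup_append]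
          refine ⟨hnd, List.nodup_singleton _, ?_⟩
          intro a ha b hb
          simp only [List.mem_singleton] at hb
          subst hb
          exact fun heq => hknotin (heq ▸ ha)
        · intro x hx
          have hx' := hperm_all.mem_iff.mp hx
          rw [List.mem_append] at hx'
          rcases hx' with hx' | hx'
          · have h7 := hbound x hx'
            exact ⟨h7.1, by have := h7.2; omega⟩
          · simp only [List.mem_singleton] at hx'
            subst hx'
            exact ⟨Int.natCast_nonneg k, by push_cast; omega⟩
        · rw [hnewB]; simp only; exact hkeys
      -- ============ other characters ============
      · have hdk1 : pvDepth cs (k+1) = pvDepth cs k := by rw [hdsucc]; simp [h1, h2]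
        have hnewP : pvSP sl cs (k+1) = (S, P) := by
          rw [hstep]; simp [pvStepP, h1, h2]
        have hnewB : pvSB cs (k+1) = (O, C, dep) := by
          rw [hstepB]; simp [pvBktStep, h1, h2]
        refine PvInv.mk ?_ ?_ ?_ ?_ ?_ ?_ ?_ ?_ ?_
        · rw [hnewB]; simp only; omega
        · rw [hnewP]; simp only; omega
        · rw [hnewP]; simp only
          intro t ht
          obtain ⟨x, hx, hxk, hopx, hdx, hdomx⟩ := hstk t ht
          refine ⟨x, hx, by omega, hopx, hdx, ?_⟩
          intro m hm1 hm2
          rcases Nat.lt_or_ge m (k+1) with hm | hm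
          · exact hdomx m hm1 (by omega)
          · have hmk : m = k + 1 := by omega
            subst hmk
            rw [hdk1]
            exact hdomx k hxk le_rfl
        · rw [hnewP, hnewB]; simp only; exact hbkt
        · rw [hnewP, hnewB]; simp only; exact hlast
        · rw [hnewP, hnewB]; simp only; exact hperm
        · rw [hnewP, hnewB]; simp only; exact hnd
        · rw [hnewP, hnewB]; simp only
          intro x hx
          have h7 := hbound x hx
          exact ⟨h7.1, by have := h7.2; omega⟩
        · rw [hnewB]; simp only; exact hkeys

-- ---- final assembly: both ports compute the emission fold over the same pair list ----

lemma pvFoldlCongr {α γ : Type} (f g : γ → α → γ) (l : List α)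
    (h : ∀ q ∈ l, ∀ z, f z q = g z q) : ∀ z, l.foldl f z = l.foldl g z := by
  induction l with
  | nil => intro z; rfl
  | cons a t ih =>
    intro z
    rw [List.foldl_cons, List.foldl_cons, h a List.mem_cons_self]
    exact ih (fun q hq z => h q (List.mem_cons_of_mem _ hq) z) _

lemma pvChk_elim (sl : List Char) (q : Int × Int) (h : pvChk sl q = true)
    (h1 : 0 ≤ q.1) (h2 : 0 ≤ q.2) :
    ∃ (a b : Nat) (ca cb : Char), q.1 = (a : Int) ∧ q.2 = (b : Int) ∧
      sl[a]? = some ca ∧ ca ≠ '-' ∧ sl[b]? = some cb ∧ cb ≠ '-' := by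
  obtain ⟨a, ha⟩ := Int.eq_ofNat_of_zero_le h1
  obtain ⟨b, hb⟩ := Int.eq_ofNat_of_zero_le h2
  unfold pvChk at h
  rw [ha, hb, PySem.List.pyGet?_natCast] at h
  cases hga : sl[a]? with
  | none => rw [hga] at h; simp at h
  | some ca =>
    rw [hga] at h
    simp only at h
    by_cases hca : ca = '-'
    · rw [if_pos hca] at h; simp at h
    · rw [if_neg hca, PySem.List.pyGet?_natCast] at h
      cases hgb : sl[b]? with
      | none => rw [hgb] at h; simp at h
      | some cb =>
        rw [hgb] at h
        simp only at h
        exact ⟨a, b, ca, cb, ha, hb, hga, hca, hgb, by simpa using h⟩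

lemma pvEmitB_expand (sl : List Char) (a b : Nat) (ca cb : Char)
    (hga : sl[a]? = some ca) (hca : ca ≠ '-') (hgb : sl[b]? = some cb) (hcb : cb ≠ '-')
    (out : List Char) :
    pvEmitB sl out ((a : Int), (b : Int))
      = (out.set ((sl.take a).countP (fun c => decide (c ≠ '-'))) '(').set
          ((sl.take b).countP (fun c => decide (c ≠ '-'))) ')' := by
  have hal : a < sl.length := (List.getElem?_eq_some_iff.mp hga).1
  have hbl : b < sl.length := (List.getElem?_eq_some_iff.mp hgb).1
  unfold pvEmitB
  simp only [PySem.List.pyGet?_natCast, hga, hgb]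
  rw [if_neg hca, if_neg hcb]
  rw [pvMappedB_eq sl a (by omega), pvMappedB_eq sl b (by omega)]
  simp [PySem.List.pySetD_natCast]

lemma pvEmit_expand (sl : List Char) (a b : Nat) (ca cb : Char)
    (hga : sl[a]? = some ca) (hca : ca ≠ '-') (hgb : sl[b]? = some cb) (hcb : cb ≠ '-')
    (out : List Char) :
    pvEmit (pvPosMap sl).1 out ((a : Int), (b : Int))
      = (out.set ((sl.take a).countP (fun c => decide (c ≠ '-'))) '(').set
          ((sl.take b).countP (fun c => decide (c ≠ '-'))) ')' := by
  have hal : a < sl.length := (List.getElem?_eq_some_iff.mp hga).1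
  have hbl : b < sl.length := (List.getElem?_eq_some_iff.mp hgb).1
  have hea : sl[a] ≠ '-' := by
    have := (List.getElem?_eq_some_iff.mp hga).2; rw [this]; exact hca
  have heb : sl[b] ≠ '-' := by
    have := (List.getElem?_eq_some_iff.mp hgb).2; rw [this]; exact hcb
  unfold pvEmit
  simp only
  rw [pvPosMap_getD_eq sl a hal hea, pvPosMap_getD_eq sl b hbl heb,
      pvMappedB_eq sl a (by omega), pvMappedB_eq sl b (by omega)]
  simp [PySem.List.pySetD_natCast]

lemma pvMapNe (sl : List Char) (a b : Nat) (hne : a ≠ b)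
    (hga : ∀ ca, sl[a]? = some ca → ca ≠ '-') (hgb : ∀ cb, sl[b]? = some cb → cb ≠ '-')
    (hal : a < sl.length) (hbl : b < sl.length) :
    (sl.take a).countP (fun c => decide (c ≠ '-'))
      ≠ (sl.take b).countP (fun c => decide (c ≠ '-')) := by
  rcases Nat.lt_trichotomy a b with h | h | h
  · exact Nat.ne_of_lt (pvMapped_mono sl a b h (by omega) hga)
  · omega
  · exact (Nat.ne_of_lt (pvMapped_mono sl b a h (by omega) hgb)).symm

lemma pvEmitB_comm (sl : List Char) (x y : Int × Int)
    (hx : pvChk sl x = true) (hx1 : 0 ≤ x.1) (hx2 : 0 ≤ x.2)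
    (hy : pvChk sl y = true) (hy1 : 0 ≤ y.1) (hy2 : 0 ≤ y.2)
    (h12 : x.1 ≠ x.2) (h34 : y.1 ≠ y.2)
    (h13 : x.1 ≠ y.1) (h14 : x.1 ≠ y.2) (h23 : x.2 ≠ y.1) (h24 : x.2 ≠ y.2)
    (z : List Char) :
    pvEmitB sl (pvEmitB sl z x) y = pvEmitB sl (pvEmitB sl z y) x := by
  obtain ⟨a1, a2, ca1, ca2, he1, he2, hg1, hc1, hg2, hc2⟩ := pvChk_elim sl x hx hx1 hx2
  obtain ⟨b1, b2, cb1, cb2, hf1, hf2, hh1, hd1, hh2, hd2⟩ := pvChk_elim sl y hy hy1 hy2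
  have hxe : x = ((a1 : Int), (a2 : Int)) := Prod.ext he1 he2
  have hye : y = ((b1 : Int), (b2 : Int)) := Prod.ext hf1 hf2
  subst hxe; subst hye
  simp only at he1 he2 hf1 hf2 h12 h34 h13 h14 h23 h24
  have ha1 : a1 < sl.length := (List.getElem?_eq_some_iff.mp hg1).1
  have ha2 : a2 < sl.length := (List.getElem?_eq_some_iff.mp hg2).1
  have hb1 : b1 < sl.length := (List.getElem?_eq_some_iff.mp hh1).1
  have hb2 : b2 < sl.length := (List.getElem?_eq_some_iff.mp hh2).1
  have hng : ∀ (u : Nat) (cu : Char), sl[u]? = some cu → cu ≠ '-' →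
      (∀ c, sl[u]? = some c → c ≠ '-') := by
    intro u cu hu hcu c hc
    rw [hu] at hc
    rw [← Option.some.inj hc]
    exact hcu
  have m12 := pvMapNe sl a1 a2 (by exact_mod_cast h12) (hng a1 ca1 hg1 hc1) (hng a2 ca2 hg2 hc2) ha1 ha2
  have m34 := pvMapNe sl b1 b2 (by exact_mod_cast h34) (hng b1 cb1 hh1 hd1) (hng b2 cb2 hh2 hd2) hb1 hb2
  have m13 := pvMapNe sl a1 b1 (by exact_mod_cast h13) (hng a1 ca1 hg1 hc1) (hng b1 cb1 hh1 hd1) ha1 hb1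
  have m14 := pvMapNe sl a1 b2 (by exact_mod_cast h14) (hng a1 ca1 hg1 hc1) (hng b2 cb2 hh2 hd2) ha1 hb2
  have m23 := pvMapNe sl a2 b1 (by exact_mod_cast h23) (hng a2 ca2 hg2 hc2) (hng b1 cb1 hh1 hd1) ha2 hb1
  have m24 := pvMapNe sl a2 b2 (by exact_mod_cast h24) (hng a2 ca2 hg2 hc2) (hng b2 cb2 hh2 hd2) ha2 hb2
  rw [pvEmitB_expand sl a1 a2 ca1 ca2 hg1 hc1 hg2 hc2,
      pvEmitB_expand sl b1 b2 cb1 cb2 hh1 hd1 hh2 hd2,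
      pvEmitB_expand sl b1 b2 cb1 cb2 hh1 hd1 hh2 hd2,
      pvEmitB_expand sl a1 a2 ca1 ca2 hg1 hc1 hg2 hc2]
  rw [List.set_comm _ _ m23, List.set_comm _ _ m13, List.set_comm _ _ m24, List.set_comm _ _ m14]

-- ===== VERDICT (by name: the statement is the Claim_ definition above) =====
theorem recover_ss_spec : Claim_equal_recover_ss := by
  unfold Claim_equal_recover_ss
  intro css seq _ hpre
  obtain ⟨hbal, hp2⟩ := hpre
  unfold Spec_recover_ss
  have hEfull : (PySem.List.enumerate css.toList 0).take css.toList.length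
      = PySem.List.enumerate css.toList 0 := by
    rw [List.take_of_length_le (by rw [PySem.List.length_enumerate])]
  obtain ⟨hdep, hlen, hstk, hbkt, hlast, hperm, hnd, hbound, hkeys⟩ :=
    pv_master seq.toList css.toList hbal hp2 css.toList.length le_rfl
  unfold pvSP pvSB at hperm hnd hbound
  rw [hEfull] at hperm hnd hbound
  -- names for the final states
  set sl := seq.toList with hsl
  set P := ((PySem.List.enumerate css.toList 0).foldl (pvStepP sl) ([], [])).2 with hP
  set stB := (PySem.List.enumerate css.toList 0).foldl pvBktStep
      (PySem.Dict.empty, PySem.Dict.empty, 0) with hstB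
  set Z := pvZ stB.1 stB.2.1 with hZ
  -- the two replicate lengths agree
  have hinit : List.replicate ((pvPosMap sl).2).toNat '.'
      = List.replicate (((sl.length : Int)) - (sl.count '-' : Int)).toNat '.' := by
    rw [pvPosMap_snd]
    have := pvCountPartition sl sl.length le_rfl
    rw [List.take_of_length_le le_rfl] at this
    rw [this]
  -- A's loop = emission over the collected pairs
  have hA : recover_ss css seq
      = String.mk (P.foldl (pvEmit (pvPosMap sl).1) (List.replicate ((pvPosMap sl).2).toNat '.')) := by
    unfold recover_ss
    simp only [← hsl]
    rw [pv_loop_eq sl (pvPosMap sl).1 ((pvPosMap sl).2).toNat (pv_Hpm sl)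
        (PySem.List.enumerate css.toList 0) [] _ ?hl (by simp) (by simp)]
    case hl =>
      intro p hp
      rcases (PySem.List.mem_enumerate_iff _ _ _).mp hp with ⟨j, hj, rfl⟩
      simp
  -- B's program = emission over Z
  have hB : recover_ss_alt css seq
      = String.mk (Z.foldl (pvEmitB sl)
          (List.replicate (((sl.length : Int)) - (sl.count '-' : Int)).toNat '.')) := by
    unfold recover_ss_alt
    simp only
    rw [pvFoldNested]
    rfl
  -- membership facts for the collected pairs
  have hmemP : ∀ q ∈ P, pvChk sl q = true ∧ 0 ≤ q.1 ∧ 0 ≤ q.2 := by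
    intro q hq
    have hqf := hperm.mem_iff.mp hq
    have hchk := List.of_mem_filter hqf
    have hqZ : q ∈ Z := List.mem_of_mem_filter hqf
    have hq1 : q.1 ∈ pvEnds stB.1 stB.2.1 := by
      unfold pvEnds
      rw [List.mem_flatMap]
      exact ⟨q, hqZ, by simp⟩
    have hq2 : q.2 ∈ pvEnds stB.1 stB.2.1 := by
      unfold pvEnds
      rw [List.mem_flatMap]
      exact ⟨q, hqZ, by simp⟩
    exact ⟨hchk,
      (hbound q.1 (List.mem_append.mpr (Or.inr hq1))).1,
      (hbound q.2 (List.mem_append.mpr (Or.inr hq2))).1⟩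
  -- distinctness of endpoints across the pair list
  have hndE : (pvEnds stB.1 stB.2.1).Nodup := (List.nodup_append.mp hnd).2.1
  have hdisj := List.nodup_flatMap.mp hndE
  have hpairs_ne : ∀ x ∈ Z, ∀ y ∈ Z, x ≠ y →
      x.1 ≠ y.1 ∧ x.1 ≠ y.2 ∧ x.2 ≠ y.1 ∧ x.2 ≠ y.2 := by
    intro x hxZ y hyZ hne
    have hdis := (List.Pairwise.forall (fun {a b} h => List.Disjoint.symm h) hdisj.2) hxZ hyZ hne
    refine ⟨?_, ?_, ?_, ?_⟩
    · intro he
      exact hdis (show x.1 ∈ [x.1, x.2] by simp) (show x.1 ∈ [y.1, y.2] by simp [he])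
    · intro he
      exact hdis (show x.1 ∈ [x.1, x.2] by simp) (show x.1 ∈ [y.1, y.2] by simp [he])
    · intro he
      exact hdis (show x.2 ∈ [x.1, x.2] by simp) (show x.2 ∈ [y.1, y.2] by simp [he])
    · intro he
      exact hdis (show x.2 ∈ [x.1, x.2] by simp) (show x.2 ∈ [y.1, y.2] by simp [he])
  have hself_ne : ∀ x ∈ Z, x.1 ≠ x.2 := by
    intro x hxZ
    have := hdisj.1 x hxZ
    simpa using this
  -- chain of equalities
  rw [hA, hB, hinit]
  congr 1
  rw [pvFoldlCongr (pvEmit (pvPosMap sl).1) (pvEmitB sl) P ?hcong]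
  case hcong =>
    intro q hq z
    obtain ⟨hchk, h1, h2⟩ := hmemP q hq
    obtain ⟨a, b, ca, cb, hea, heb, hga, hca, hgb, hcb⟩ := pvChk_elim sl q hchk h1 h2
    have hqe : q = ((a : Int), (b : Int)) := Prod.ext hea heb
    rw [hqe, pvEmit_expand sl a b ca cb hga hca hgb hcb,
        pvEmitB_expand sl a b ca cb hga hca hgb hcb]
  rw [hperm.foldl_eq' ?hcomm]
  case hcomm =>
    intro x hxP y hyP z
    by_cases hxy : x = y
    · rw [hxy]
    · obtain ⟨hcx, hx1, hx2⟩ := hmemP x hxP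
      obtain ⟨hcy, hy1, hy2⟩ := hmemP y hyP
      have hxZ : x ∈ Z := List.mem_of_mem_filter (hperm.mem_iff.mp hxP)
      have hyZ : y ∈ Z := List.mem_of_mem_filter (hperm.mem_iff.mp hyP)
      obtain ⟨d1, d2, d3, d4⟩ := hpairs_ne x hxZ y hyZ hxy
      exact pvEmitB_comm sl x y hcx hx1 hx2 hcy hy1 hy2
        (hself_ne x hxZ) (hself_ne y hyZ) d1 d2 d3 d4 z
  rw [← pvFoldFilter (pvChk sl) (pvEmitB sl) (fun z a ha => pvEmitB_id sl z a ha)]
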